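-- pv_equiv track=rewrite | github.com/kah-ve/codesignal | Arcade/matrixElementsSum/matrixElementsSum.py | matrixElementsSum
-- ===== SOURCE A (Python) =====
-- def matrixElementsSum(matrix):
--     suitableRooms = 0
--     zippedMatrix = list(zip(*matrix))
--     for i in range(len(matrix[0])):
--         for j in range(len(matrix)):
--             if zippedMatrix[i][j] == 0:
--                 break;
--             else:
--                 suitableRooms += zippedMatrix[i][j]
--     return suitableRooms
-- ===== SOURCE B (Python) =====
-- def matrixElementsSum(matrix):
--     cols = len(matrix[0])
--     total = 0
--     dead = set()
--     for row in matrix: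
--         for j in range(cols):
--             if row[j] == 0:
--                 dead.add(j)
--             elif j not in dead:
--                 total += row[j]
--     return total
-- ===== Notes on version B (the rewrite author's own statement) =====
-- stated objective: idiomatic
-- what changed: Replaces the transpose (zip(*matrix)) plus per-column break scan by a single row-major pass that maintains a set of dead column indices (columns in which a zero has been seen).
import Mathlib
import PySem

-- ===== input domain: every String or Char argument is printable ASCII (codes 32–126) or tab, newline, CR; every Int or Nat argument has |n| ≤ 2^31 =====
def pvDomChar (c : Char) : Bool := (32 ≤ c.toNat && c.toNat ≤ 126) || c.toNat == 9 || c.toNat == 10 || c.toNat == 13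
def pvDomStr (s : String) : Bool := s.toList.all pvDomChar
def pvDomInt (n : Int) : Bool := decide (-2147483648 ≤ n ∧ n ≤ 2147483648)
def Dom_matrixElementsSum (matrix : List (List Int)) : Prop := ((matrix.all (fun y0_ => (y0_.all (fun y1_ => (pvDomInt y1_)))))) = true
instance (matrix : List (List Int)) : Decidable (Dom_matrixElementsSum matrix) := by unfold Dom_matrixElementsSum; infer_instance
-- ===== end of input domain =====

-- B replaces A's transpose (zip(*matrix)) + per-column break scan by one row-major pass with a set of dead column indices (idiomatic).

-- ===== PORT A =====
-- zip(*matrix): the first n entries of each column, n = min row length (hand port; exact since getD is only read at i < every row length)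
def pyZipStar (m : List (List Int)) : List (List Int) :=
  let n := (m.map List.length).min?.getD 0
  (List.range n).map (fun i => m.map (fun r => r.getD i 0))

-- inner 'for j in range(len(matrix))' with break: the amount added to suitableRooms for one column
def innerA (zi : List Int) (js : List Nat) : Int :=
  match js with
  | [] => 0
  | j :: rest =>
    let v := zi.getD j 0
    if v = 0 then 0 else v + innerA zi rest

def matrixElementsSum (matrix : List (List Int)) : Int :=
  let zippedMatrix := pyZipStar matrix
  (List.range (matrix.headD []).length).foldl
    (fun acc i => acc + innerA (zippedMatrix.getD i []) (List.range matrix.length)) 0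

-- ===== PORT B =====
def rowStepB (cols : Nat) (st : Int × PySem.Set Nat) (row : List Int) : Int × PySem.Set Nat :=
  (List.range cols).foldl
    (fun st j =>
      let v := row.getD j 0
      if v = 0 then (st.1, PySem.Set.add st.2 j)
      else if PySem.Set.contains st.2 j then st else (st.1 + v, st.2)) st

def matrixElementsSum_alt (matrix : List (List Int)) : Int :=
  let cols := (matrix.headD []).length
  (matrix.foldl (rowStepB cols) (0, PySem.Set.empty)).1

-- ===== PRECONDITION & SPEC =====
-- Pre_ excludes exactly the inputs where Python A raises IndexError: the empty matrix and matrices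
-- with some row shorter than the first row (zip truncates below len(matrix[0])). B raises there too.
def Pre_matrixElementsSum (matrix : List (List Int)) : Prop :=
  matrix ≠ [] ∧ ∀ r ∈ matrix, (matrix.headD []).length ≤ r.length
instance (matrix : List (List Int)) : Decidable (Pre_matrixElementsSum matrix) := by
  unfold Pre_matrixElementsSum; infer_instance
def pvWitness_matrixElementsSum : List (List Int) := [[1, 2], [0, 3]]

def Spec_matrixElementsSum (matrix : List (List Int)) (out : Int) : Prop := out = matrixElementsSum_alt matrix
instance (matrix : List (List Int)) (out : Int) : Decidable (Spec_matrixElementsSum matrix out) := by unfold Spec_matrixElementsSum; infer_instance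

-- ===== CLAIM (what is proved, stated in full; the proofs are below) =====
def Claim_equal_matrixElementsSum : Prop := ∀ (matrix : List (List Int)), Dom_matrixElementsSum matrix → Pre_matrixElementsSum matrix → Spec_matrixElementsSum matrix (matrixElementsSum matrix)

-- ===== LEMMAS AND PROOFS =====

-- the common spec: sum of each column down to (excluding) its first zero
def colSum (rows : List (List Int)) (j : Nat) : Int :=
  ((rows.map (fun r => r.getD j 0)).takeWhile (fun v => v != 0)).sum

theorem innerA_eq_takeWhile (zi d : List Int) (k : Nat) (h : zi.drop k = d) :
    innerA zi (List.range' k d.length) = (d.takeWhile (fun v => v != 0)).sum := by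
  induction d generalizing k with
  | nil => simp [innerA]
  | cons v rest ih =>
    have hvk : zi[k]? = some v := by
      have h0 : (List.drop k zi)[0]? = zi[k + 0]? := List.getElem?_drop
      rw [h] at h0; simpa using h0.symm
    have hget : zi.getD k 0 = v := by
      simp [List.getD_eq_getElem?_getD, hvk]
    have hdrop : zi.drop (k + 1) = rest := by
      have := congrArg (List.drop 1) h
      simpa [List.drop_drop, Nat.add_comm] using this
    rw [show (v :: rest).length = rest.length + 1 from rfl, List.range'_succ]
    simp only [innerA, hget]
    by_cases hv : v = 0
    · simp [hv]
    · simp [hv, ih (k + 1) hdrop]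

theorem sum_foldl (f : Nat → Int) (l : List Nat) (a : Int) :
    l.foldl (fun acc i => acc + f i) a = a + (l.map f).sum := by
  induction l generalizing a with
  | nil => simp
  | cons x xs ih => simp [ih, add_assoc]

theorem map_sum_add (f g : Nat → Int) (l : List Nat) :
    (l.map (fun j => f j + g j)).sum = (l.map f).sum + (l.map g).sum := by
  induction l with
  | nil => simp
  | cons x xs ih => simp [ih]; ring

-- the dead set after one row of B
def deadUpd (row : List Int) (l : List Nat) (dead : PySem.Set Nat) : PySem.Set Nat :=
  l.foldl (fun d j => if row.getD j 0 = 0 then PySem.Set.add d j else d) dead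

theorem mem_deadUpd (row : List Int) (l : List Nat) (dead : PySem.Set Nat) (y : Nat) :
    y ∈ deadUpd row l dead ↔ y ∈ dead ∨ (y ∈ l ∧ row.getD y 0 = 0) := by
  induction l generalizing dead with
  | nil => simp [deadUpd]
  | cons j rest ih =>
    simp only [deadUpd, List.foldl_cons, List.mem_cons] at *
    by_cases hv : row.getD j 0 = 0
    · rw [if_pos hv, ih, PySem.Set.mem_add]
      constructor
      · rintro ((h | rfl) | ⟨h, hz⟩)
        · exact Or.inl h
        · exact Or.inr ⟨Or.inl rfl, hv⟩
        · exact Or.inr ⟨Or.inr h, hz⟩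
      · rintro (h | ⟨hy, hz⟩)
        · exact Or.inl (Or.inl h)
        · rcases hy with rfl | h
          · exact Or.inl (Or.inr rfl)
          · exact Or.inr ⟨h, hz⟩
    · rw [if_neg hv, ih]
      constructor
      · rintro (h | ⟨h, hz⟩)
        · exact Or.inl h
        · exact Or.inr ⟨Or.inr h, hz⟩
      · rintro (h | ⟨hy, hz⟩)
        · exact Or.inl h
        · rcases hy with rfl | h
          · exact absurd hz hv
          · exact Or.inr ⟨h, hz⟩

-- characterisation of one inner (per-row) fold of B
theorem rowStepB_spec (row : List Int) (m : Nat) :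
    ∀ (k : Nat) (s : Int) (dead : PySem.Set Nat),
    ((List.range' k m).foldl
      (fun st j =>
        let v := row.getD j 0
        if v = 0 then (st.1, PySem.Set.add st.2 j)
        else if PySem.Set.contains st.2 j then st else (st.1 + v, st.2)) (s, dead)) =
    (s + ((List.range' k m).map (fun j =>
        if row.getD j 0 = 0 ∨ j ∈ dead then 0 else row.getD j 0)).sum,
     deadUpd row (List.range' k m) dead) := by
  induction m with
  | zero => intro k s dead; simp [deadUpd]
  | succ m ih =>
    intro k s dead
    rw [List.range'_succ]
    simp only [List.foldl_cons, List.map_cons, List.sum_cons, deadUpd]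
    by_cases hv : row.getD k 0 = 0
    · rw [if_pos hv, ih, if_pos hv]
      have hmap : ∀ j ∈ List.range' (k + 1) m,
          (if row.getD j 0 = 0 ∨ j ∈ PySem.Set.add dead k then 0 else row.getD j 0) =
          (if row.getD j 0 = 0 ∨ j ∈ dead then 0 else row.getD j 0) := by
        intro j hj
        have hjk : j ≠ k := by have := (List.mem_range'_1.mp hj).1; omega
        simp [PySem.Set.mem_add, hjk]
      rw [List.map_congr_left hmap]
      have hv' : row[k]?.getD 0 = 0 := by simpa [List.getD_eq_getElem?_getD] using hv
      simp [hv', deadUpd]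
    · rw [if_neg hv]
      by_cases hd : k ∈ dead
      · have hc : PySem.Set.contains dead k = true := (PySem.Set.contains_iff dead k).mpr hd
        rw [if_pos hc, ih, if_neg hv]
        have hv' : ¬ row[k]?.getD 0 = 0 := by simpa [List.getD_eq_getElem?_getD] using hv
        simp [hv', hd, deadUpd]
      · have hc : PySem.Set.contains dead k = false := by
          rw [Bool.eq_false_iff]
          intro h; exact hd ((PySem.Set.contains_iff dead k).mp h)
        rw [hc]
        simp only [Bool.false_eq_true, if_false, ih, if_neg hv]
        have hv' : ¬ row[k]?.getD 0 = 0 := by simpa [List.getD_eq_getElem?_getD] using hv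
        simp [hv', hd, deadUpd]
        ring

-- outer fold of B against the column sums of the remaining rows
theorem outerB (cols : Nat) (rows : List (List Int)) :
    ∀ (s : Int) (dead : PySem.Set Nat),
    (rows.foldl (rowStepB cols) (s, dead)).1 =
    s + ((List.range cols).map (fun j => if j ∈ dead then 0 else colSum rows j)).sum := by
  induction rows with
  | nil => intro s dead; simp [colSum]
  | cons row rest ih =>
    intro s dead
    have hstep : rowStepB cols (s, dead) row =
        (s + ((List.range cols).map (fun j =>
            if row.getD j 0 = 0 ∨ j ∈ dead then 0 else row.getD j 0)).sum,
         deadUpd row (List.range cols) dead) := by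
      rw [rowStepB, List.range_eq_range', rowStepB_spec row cols 0 s dead]
    rw [List.foldl_cons, hstep, ih, add_assoc, ← map_sum_add]
    congr 1
    apply congrArg List.sum
    apply List.map_congr_left
    intro j hj
    have hjc : j < cols := List.mem_range.mp hj
    have hcol : colSum (row :: rest) j =
        if row.getD j 0 = 0 then 0 else row.getD j 0 + colSum rest j := by
      simp only [colSum, List.map_cons, List.takeWhile_cons]
      by_cases hv : row.getD j 0 = 0
      · have hv' : row[j]?.getD 0 = 0 := by simpa [List.getD_eq_getElem?_getD] using hv
        simp [hv']
      · have hv' : ¬ row[j]?.getD 0 = 0 := by simpa [List.getD_eq_getElem?_getD] using hv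
        simp [hv']
    by_cases hd : j ∈ dead
    · have : j ∈ deadUpd row (List.range cols) dead := (mem_deadUpd _ _ _ _).mpr (Or.inl hd)
      simp [hd, this]
    · by_cases hv : row.getD j 0 = 0
      · have hmem : j ∈ deadUpd row (List.range cols) dead :=
          (mem_deadUpd _ _ _ _).mpr (Or.inr ⟨hj, hv⟩)
        have hv' : row[j]?.getD 0 = 0 := by simpa [List.getD_eq_getElem?_getD] using hv
        simp [hd, hv', hmem, hcol]
      · have hmem : j ∉ deadUpd row (List.range cols) dead := by
          rw [mem_deadUpd]
          rintro (h | h)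
          · exact hd h
          · exact hv h.2
        have hv' : ¬ row[j]?.getD 0 = 0 := by simpa [List.getD_eq_getElem?_getD] using hv
        simp [hd, hv', hmem, hcol]

theorem lt_foldl_min (i : Nat) (xs : List Nat) :
    ∀ a : Nat, (∀ x ∈ xs, i < x) → i < a → i < xs.foldl min a := by
  induction xs with
  | nil => intro a _ ha; simpa using ha
  | cons x rest ih =>
    intro a hxs ha
    simp only [List.foldl_cons]
    exact ih _ (fun y hy => hxs y (List.mem_cons_of_mem _ hy))
      (Nat.lt_min.mpr ⟨ha, hxs x (List.mem_cons_self)⟩)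

-- ===== VERDICT (by name: the statement is the Claim_ definition above) =====
theorem matrixElementsSum_spec : Claim_equal_matrixElementsSum := by
  intro matrix _ hpre
  obtain ⟨hne, hlen⟩ := hpre
  unfold Spec_matrixElementsSum matrixElementsSum matrixElementsSum_alt
  rw [outerB]
  simp only [PySem.Set.empty, List.not_mem_nil, if_false, zero_add]
  rw [sum_foldl, zero_add]
  apply congrArg List.sum
  apply List.map_congr_left
  intro i hi
  have hic : i < (matrix.headD []).length := List.mem_range.mp hi
  have hn : i < ((matrix.map List.length).min?.getD 0) := by
    obtain ⟨r0, rest, rfl⟩ := List.exists_cons_of_ne_nil hne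
    simp only [List.map_cons, List.min?, Option.getD_some]
    apply lt_foldl_min
    · intro x hx
      obtain ⟨r, hr, rfl⟩ := List.mem_map.mp hx
      exact lt_of_lt_of_le hic (hlen r (List.mem_cons_of_mem _ hr))
    · exact lt_of_lt_of_le hic (hlen r0 List.mem_cons_self)
  have hzip : (pyZipStar matrix).getD i [] = matrix.map (fun r => r.getD i 0) := by
    simp [pyZipStar, List.getD_eq_getElem?_getD, hn]
  rw [hzip]
  have hlen' : (matrix.map (fun r => r.getD i 0)).length = matrix.length := by
    simp
  rw [List.range_eq_range', ← hlen',
    innerA_eq_takeWhile (matrix.map (fun r => r.getD i 0)) _ 0 (by simp)]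
  rfl
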